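-- pv_equiv track=rewrite | github.com/AkChen/PBMvCL | utils/utils.py | make_dict_KNN
-- ===== SOURCE A (Python) =====
-- def make_dict_KNN(knn_graph):
--     anc_index = []
--     pos_indices = []
--     neg_indices = []
--     num = len(knn_graph)
--
--     for i in range(num):
--         anc_index.append(i)
--         candi_pos = []
--         candi_neg = []
--         for j in range(num):
--             if knn_graph[i][j] >= 2 or knn_graph[j][i] >= 2:
--                 candi_pos.append(j)
--             else:
--                 candi_neg.append(j)
--         # end
--         pos_indices.append(candi_pos)
--         neg_indices.append(candi_neg)
--
--     return anc_index, pos_indices, neg_indices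
-- ===== SOURCE B (Python) =====
-- def make_dict_KNN(knn_graph):
--     num = len(knn_graph)
--     anc_index = list(range(num))
--     pos_indices = [[] for _ in range(num)]
--     neg_indices = [[] for _ in range(num)]
--     for i in range(num):
--         # diagonal pair (i, i)
--         if knn_graph[i][i] >= 2:
--             pos_indices[i].append(i)
--         else:
--             neg_indices[i].append(i)
--         # each unordered pair (i, j), i < j: one test, two appends
--         for j in range(i + 1, num):
--             if knn_graph[i][j] >= 2 or knn_graph[j][i] >= 2:
--                 pos_indices[i].append(j)
--                 pos_indices[j].append(i)
--             else:
--                 neg_indices[i].append(j)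
--                 neg_indices[j].append(i)
--     return anc_index, pos_indices, neg_indices
-- ===== Notes on version B (the rewrite author's own statement) =====
-- stated objective: alternative
-- what changed: A scans the full num x num grid per anchor, evaluating the symmetric test for both (i,j) and (j,i); B pre-creates all rows and iterates once over unordered pairs i < j (plus the diagonal), evaluating the test once per pair and routing the two appends to rows i and j.
import Mathlib
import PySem

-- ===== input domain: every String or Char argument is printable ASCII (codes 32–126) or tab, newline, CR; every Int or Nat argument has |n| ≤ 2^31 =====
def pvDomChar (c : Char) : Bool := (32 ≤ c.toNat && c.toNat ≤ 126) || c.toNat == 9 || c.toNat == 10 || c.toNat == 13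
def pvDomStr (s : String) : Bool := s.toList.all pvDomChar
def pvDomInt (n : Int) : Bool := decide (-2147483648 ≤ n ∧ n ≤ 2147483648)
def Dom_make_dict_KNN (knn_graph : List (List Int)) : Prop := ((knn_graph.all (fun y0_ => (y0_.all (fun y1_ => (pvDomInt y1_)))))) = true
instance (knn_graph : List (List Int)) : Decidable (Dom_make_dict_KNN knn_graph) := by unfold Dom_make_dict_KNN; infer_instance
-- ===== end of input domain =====

-- B replaces A's per-anchor full scan by one scan over unordered pairs i ≤ j,
-- evaluating the symmetric test once per pair (alternative algorithm, same results).

-- ===== PORT A =====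
-- A's full double loop: for each i, scan all j and append to candi_pos/candi_neg.
def make_dict_KNN (knn_graph : List (List Int)) : List Int × List (List Int) × List (List Int) :=
  let num := knn_graph.length
  (List.range num).foldl
    (fun (st : List Int × List (List Int) × List (List Int)) (i : Nat) =>
      let candi := (List.range num).foldl
        (fun (c : List Int × List Int) (j : Nat) =>
          if 2 ≤ PySem.List.pyGetD (PySem.List.pyGetD knn_graph (i : Int) []) (j : Int) 0 ∨
             2 ≤ PySem.List.pyGetD (PySem.List.pyGetD knn_graph (j : Int) []) (i : Int) 0 then
            (c.1 ++ [(j : Int)], c.2)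
          else
            (c.1, c.2 ++ [(j : Int)]))
        ([], [])
      (st.1 ++ [(i : Int)], st.2.1 ++ [candi.1], st.2.2 ++ [candi.2]))
    ([], [], [])

-- ===== PORT B =====
-- B's loop over unordered pairs: diagonal once, then j > i with appends to rows i and j.
def make_dict_KNN_alt (knn_graph : List (List Int)) : List Int × List (List Int) × List (List Int) :=
  let num := knn_graph.length
  let anc_index : List Int := (List.range num).map Int.ofNat
  let pn := (List.range num).foldl
    (fun (st : List (List Int) × List (List Int)) (i : Nat) =>
      let st :=
        if 2 ≤ PySem.List.pyGetD (PySem.List.pyGetD knn_graph (i : Int) []) (i : Int) 0 then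
          (st.1.modify i (fun r => r ++ [(i : Int)]), st.2)
        else
          (st.1, st.2.modify i (fun r => r ++ [(i : Int)]))
      (List.range' (i + 1) (num - (i + 1))).foldl
        (fun (st2 : List (List Int) × List (List Int)) (j : Nat) =>
          if 2 ≤ PySem.List.pyGetD (PySem.List.pyGetD knn_graph (i : Int) []) (j : Int) 0 ∨
             2 ≤ PySem.List.pyGetD (PySem.List.pyGetD knn_graph (j : Int) []) (i : Int) 0 then
            ((st2.1.modify i (fun r => r ++ [(j : Int)])).modify j (fun r => r ++ [(i : Int)]), st2.2)
          else
            (st2.1, (st2.2.modify i (fun r => r ++ [(j : Int)])).modify j (fun r => r ++ [(i : Int)])))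
        st)
    ((List.range num).map (fun _ => []), (List.range num).map (fun _ => []))
  (anc_index, pn.1, pn.2)

-- ===== PRECONDITION & SPEC =====
-- Pre_ excludes exactly the ragged inputs (some row shorter than the number of rows),
-- on which Python A raises IndexError.
def Pre_make_dict_KNN (knn_graph : List (List Int)) : Prop :=
  ∀ row ∈ knn_graph, knn_graph.length ≤ row.length
instance (knn_graph : List (List Int)) : Decidable (Pre_make_dict_KNN knn_graph) := by unfold Pre_make_dict_KNN; infer_instance

def pvWitness_make_dict_KNN : List (List Int) := [[2, 0, 1], [0, 3, 0], [5, 0, 0]]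

def Spec_make_dict_KNN (knn_graph : List (List Int)) (out : List Int × List (List Int) × List (List Int)) : Prop := out = make_dict_KNN_alt knn_graph
instance (knn_graph : List (List Int)) (out : List Int × List (List Int) × List (List Int)) : Decidable (Spec_make_dict_KNN knn_graph out) := by unfold Spec_make_dict_KNN; infer_instance

-- ===== CLAIM (what is proved, stated in full; the proofs are below) =====
def Claim_equal_make_dict_KNN : Prop := ∀ (knn_graph : List (List Int)), Dom_make_dict_KNN knn_graph → Pre_make_dict_KNN knn_graph → Spec_make_dict_KNN knn_graph (make_dict_KNN knn_graph)

-- ===== LEMMAS AND PROOFS =====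

-- the symmetric membership test, as both ports compute it
def pvC (g : List (List Int)) (k j : Nat) : Bool :=
  decide (2 ≤ PySem.List.pyGetD (PySem.List.pyGetD g (k : Int) []) (j : Int) 0) ||
  decide (2 ≤ PySem.List.pyGetD (PySem.List.pyGetD g (j : Int) []) (k : Int) 0)

theorem pvC_symm (g : List (List Int)) (k j : Nat) : pvC g k j = pvC g j k := by
  simp [pvC, Bool.or_comm]

-- ===== A characterised =====
theorem pvA_inner (g : List (List Int)) (i : Nat) (l : List Nat) (a b : List Int) :
    l.foldl
      (fun (c : List Int × List Int) (j : Nat) =>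
        if 2 ≤ PySem.List.pyGetD (PySem.List.pyGetD g (i : Int) []) (j : Int) 0 ∨
           2 ≤ PySem.List.pyGetD (PySem.List.pyGetD g (j : Int) []) (i : Int) 0 then
          (c.1 ++ [(j : Int)], c.2)
        else
          (c.1, c.2 ++ [(j : Int)]))
      (a, b)
    = (a ++ (l.filter (fun j => pvC g i j)).map Int.ofNat,
       b ++ (l.filter (fun j => !pvC g i j)).map Int.ofNat) := by
  induction l generalizing a b with
  | nil => simp
  | cons x xs ih =>
    simp only [List.foldl_cons]
    by_cases h : (2 ≤ PySem.List.pyGetD (PySem.List.pyGetD g (i : Int) []) (x : Int) 0 ∨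
        2 ≤ PySem.List.pyGetD (PySem.List.pyGetD g (x : Int) []) (i : Int) 0)
    · rw [if_pos h, ih]
      have hc : pvC g i x = true := by
        simp only [pvC, Bool.or_eq_true, decide_eq_true_eq]; exact h
      simp [hc, Int.ofNat_eq_natCast]
    · rw [if_neg h, ih]
      have hc : pvC g i x = false := by
        simp only [pvC, Bool.or_eq_false_iff, decide_eq_false_iff_not]
        exact ⟨fun hh => h (Or.inl hh), fun hh => h (Or.inr hh)⟩
      simp [hc, Int.ofNat_eq_natCast]

theorem pvA_char (g : List (List Int)) :
    make_dict_KNN g =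
      ((List.range g.length).map Int.ofNat,
       (List.range g.length).map (fun k => ((List.range g.length).filter (fun j => pvC g k j)).map Int.ofNat),
       (List.range g.length).map (fun k => ((List.range g.length).filter (fun j => !pvC g k j)).map Int.ofNat)) := by
  show (List.range g.length).foldl _ ([], [], []) = _
  have key : ∀ m : Nat,
      (List.range m).foldl
        (fun (st : List Int × List (List Int) × List (List Int)) (i : Nat) =>
          let candi := (List.range g.length).foldl
            (fun (c : List Int × List Int) (j : Nat) =>
              if 2 ≤ PySem.List.pyGetD (PySem.List.pyGetD g (i : Int) []) (j : Int) 0 ∨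
                 2 ≤ PySem.List.pyGetD (PySem.List.pyGetD g (j : Int) []) (i : Int) 0 then
                (c.1 ++ [(j : Int)], c.2)
              else
                (c.1, c.2 ++ [(j : Int)]))
            ([], [])
          (st.1 ++ [(i : Int)], st.2.1 ++ [candi.1], st.2.2 ++ [candi.2]))
        ([], [], [])
      = ((List.range m).map Int.ofNat,
         (List.range m).map (fun k => ((List.range g.length).filter (fun j => pvC g k j)).map Int.ofNat),
         (List.range m).map (fun k => ((List.range g.length).filter (fun j => !pvC g k j)).map Int.ofNat)) := by
    intro m
    induction m with
    | zero => simp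
    | succ m ih =>
      rw [List.range_succ, List.foldl_append, ih]
      simp only [List.foldl_cons, List.foldl_nil, pvA_inner, List.nil_append]
      simp [Int.ofNat_eq_natCast]
  exact key g.length

-- ===== B machinery =====
def pvInnerBody (g : List (List Int)) (i : Nat) :
    (List (List Int) × List (List Int)) → Nat → (List (List Int) × List (List Int)) :=
  fun st2 j =>
    if 2 ≤ PySem.List.pyGetD (PySem.List.pyGetD g (i : Int) []) (j : Int) 0 ∨
       2 ≤ PySem.List.pyGetD (PySem.List.pyGetD g (j : Int) []) (i : Int) 0 then
      ((st2.1.modify i (fun r => r ++ [(j : Int)])).modify j (fun r => r ++ [(i : Int)]), st2.2)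
    else
      (st2.1, (st2.2.modify i (fun r => r ++ [(j : Int)])).modify j (fun r => r ++ [(i : Int)]))

def pvOuterBody (g : List (List Int)) :
    (List (List Int) × List (List Int)) → Nat → (List (List Int) × List (List Int)) :=
  fun st i =>
    (List.range' (i + 1) (g.length - (i + 1))).foldl (pvInnerBody g i)
      (if 2 ≤ PySem.List.pyGetD (PySem.List.pyGetD g (i : Int) []) (i : Int) 0 then
        (st.1.modify i (fun r => r ++ [(i : Int)]), st.2)
      else
        (st.1, st.2.modify i (fun r => r ++ [(i : Int)])))

theorem pvB_unfold (g : List (List Int)) :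
    make_dict_KNN_alt g =
      ((List.range g.length).map Int.ofNat,
       ((List.range g.length).foldl (pvOuterBody g)
          ((List.range g.length).map (fun _ => []), (List.range g.length).map (fun _ => []))).1,
       ((List.range g.length).foldl (pvOuterBody g)
          ((List.range g.length).map (fun _ => []), (List.range g.length).map (fun _ => []))).2) := rfl

def pvRow (g : List (List Int)) (b : Bool) (i k : Nat) : List Int :=
  ((List.range g.length).filter (fun j => decide (k < i ∨ j < i) && (pvC g k j == b))).map Int.ofNat

def pvState (g : List (List Int)) (i : Nat) : List (List Int) × List (List Int) :=
  ((List.range g.length).map (pvRow g true i), (List.range g.length).map (pvRow g false i))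

def pvP (i m k j : Nat) : Bool :=
  decide ((k = i ∧ j ≤ m) ∨ (k < i) ∨ (i < k ∧ (j < i ∨ (j = i ∧ k ≤ m))))

def pvMidRow (g : List (List Int)) (b : Bool) (i m k : Nat) : List Int :=
  ((List.range g.length).filter (fun j => pvP i m k j && (pvC g k j == b))).map Int.ofNat

def pvMid (g : List (List Int)) (i m : Nat) : List (List Int) × List (List Int) :=
  ((List.range g.length).map (pvMidRow g true i m), (List.range g.length).map (pvMidRow g false i m))

theorem pv_modify_map_range (n i : Nat) (f : Nat → List Int) (h : List Int → List Int) :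
    ((List.range n).map f).modify i h = (List.range n).map (fun k => if k = i then h (f k) else f k) := by
  apply List.ext_getElem?
  intro j
  simp only [List.getElem?_modify, List.getElem?_map]
  by_cases hj : j < n
  · by_cases hij : i = j <;> simp [hj, hij]
    omega
  · simp [hj]

theorem pv_filter_le (n b : Nat) (hb : b < n) (c : Nat → Bool) :
    ((List.range n).filter (fun j => decide (j < b) && c j)).map Int.ofNat ++
      (if c b then [Int.ofNat b] else []) =
    ((List.range n).filter (fun j => decide (j ≤ b) && c j)).map Int.ofNat := by
  have hn : n = (b + 1) + (n - (b + 1)) := by omega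
  rw [hn, List.range_add, List.filter_append, List.filter_append, List.range_succ,
      List.filter_append, List.filter_append]
  have h1 : (List.range b).filter (fun j => decide (j < b) && c j) = (List.range b).filter c := by
    apply List.filter_congr; intro x hx; simp at hx; simp [hx]
  have h2 : (List.range b).filter (fun j => decide (j ≤ b) && c j) = (List.range b).filter c := by
    apply List.filter_congr; intro x hx; simp at hx; simp [Nat.le_of_lt hx]
  have h3 : ((List.range (n - (b+1))).map (fun x => b + 1 + x)).filter (fun j => decide (j < b) && c j) = [] := by
    apply List.filter_eq_nil_iff.mpr; intro a ha; simp at ha; obtain ⟨x, _, rfl⟩ := ha; simp; omega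
  have h4 : ((List.range (n - (b+1))).map (fun x => b + 1 + x)).filter (fun j => decide (j ≤ b) && c j) = [] := by
    apply List.filter_eq_nil_iff.mpr; intro a ha; simp at ha; obtain ⟨x, _, rfl⟩ := ha; simp; omega
  rw [h1, h2, h3, h4]
  by_cases hcb : c b = true <;> simp [hcb]

theorem pv_pred_ext (n : Nat) (p q : Nat → Bool) (h : ∀ j, j < n → p j = q j) :
    (List.range n).filter p = (List.range n).filter q := by
  apply List.filter_congr; intro x hx; exact h x (by simpa using hx)

theorem pv_band_congr {p q : Bool} (c : Bool) (h : p = q) : (p && c) = (q && c) := by rw [h]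

theorem pvC_diag (g : List (List Int)) (i : Nat) :
    pvC g i i = decide (2 ≤ PySem.List.pyGetD (PySem.List.pyGetD g (i : Int) []) (i : Int) 0) := by
  simp [pvC]

theorem pv_diag_mod (g : List (List Int)) (i : Nat) (b : Bool) (hi : i < g.length)
    (hb : pvC g i i = b) :
    ((List.range g.length).map (pvRow g b i)).modify i (fun r => r ++ [(i : Int)]) =
      (List.range g.length).map (pvMidRow g b i i) := by
  rw [pv_modify_map_range]
  apply List.map_congr_left
  intro k hk
  simp only [List.mem_range] at hk
  by_cases hki : k = i
  · subst hki
    rw [if_pos rfl]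
    unfold pvRow pvMidRow
    have e1 : (List.range g.length).filter (fun j => decide (k < k ∨ j < k) && (pvC g k j == b)) =
        (List.range g.length).filter (fun j => decide (j < k) && (pvC g k j == b)) := by
      apply pv_pred_ext; intro j hj
      exact pv_band_congr _ (by rw [decide_eq_decide]; omega)
    have e2 : (List.range g.length).filter (fun j => pvP k k k j && (pvC g k j == b)) =
        (List.range g.length).filter (fun j => decide (j ≤ k) && (pvC g k j == b)) := by
      apply pv_pred_ext; intro j hj
      unfold pvP
      exact pv_band_congr _ (by rw [decide_eq_decide]; omega)
    rw [e1, e2, ← pv_filter_le g.length k hk]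
    have hc : (pvC g k k == b) = true := by simp [hb]
    rw [hc]
    simp [Int.ofNat_eq_natCast]
  · rw [if_neg hki]
    unfold pvRow pvMidRow
    refine congrArg (List.map _) (pv_pred_ext _ _ _ ?_); intro j hj
    unfold pvP
    exact pv_band_congr _ (by rw [decide_eq_decide]; omega)

theorem pv_diag_untouched (g : List (List Int)) (i : Nat) (b : Bool) (hi : i < g.length)
    (hb : pvC g i i ≠ b) :
    (List.range g.length).map (pvRow g b i) = (List.range g.length).map (pvMidRow g b i i) := by
  apply List.map_congr_left
  intro k hk
  simp only [List.mem_range] at hk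
  unfold pvRow pvMidRow
  refine congrArg (List.map _) (pv_pred_ext _ _ _ ?_); intro j hj
  by_cases hkj : k = i ∧ j = i
  · obtain ⟨hk1, hk2⟩ := hkj
    subst hk1; subst hk2
    have hc : (pvC g j j == b) = false := by
      cases hcc : pvC g j j <;> cases b <;> simp_all
    rw [hc]
    simp
  · unfold pvP
    exact pv_band_congr _ (by rw [decide_eq_decide]; omega)

theorem pvB_diag (g : List (List Int)) (i : Nat) (hi : i < g.length) :
    (if 2 ≤ PySem.List.pyGetD (PySem.List.pyGetD g (i : Int) []) (i : Int) 0 then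
        ((pvState g i).1.modify i (fun r => r ++ [(i : Int)]), (pvState g i).2)
      else
        ((pvState g i).1, (pvState g i).2.modify i (fun r => r ++ [(i : Int)])))
    = pvMid g i i := by
  by_cases hd : 2 ≤ PySem.List.pyGetD (PySem.List.pyGetD g (i : Int) []) (i : Int) 0
  · rw [if_pos hd]
    have hb : pvC g i i = true := by rw [pvC_diag]; exact decide_eq_true hd
    unfold pvState pvMid
    exact Prod.ext (pv_diag_mod g i true hi hb) (pv_diag_untouched g i false hi (by simp [hb]))
  · rw [if_neg hd]
    have hb : pvC g i i = false := by rw [pvC_diag]; exact decide_eq_false hd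
    unfold pvState pvMid
    exact Prod.ext (pv_diag_untouched g i true hi (by simp [hb])) (pv_diag_mod g i false hi hb)

theorem pv_step_mod (g : List (List Int)) (i m : Nat) (b : Bool) (hi : i ≤ m) (hm : m + 1 < g.length)
    (hb : pvC g i (m + 1) = b) :
    (((List.range g.length).map (pvMidRow g b i m)).modify i (fun r => r ++ [((m+1 : Nat) : Int)])).modify (m+1)
        (fun r => r ++ [(i : Int)]) =
      (List.range g.length).map (pvMidRow g b i (m+1)) := by
  rw [pv_modify_map_range, pv_modify_map_range]
  apply List.map_congr_left
  intro k hk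
  simp only [List.mem_range] at hk
  by_cases hk1 : k = m + 1
  · subst hk1
    rw [if_pos rfl, if_neg (by omega)]
    unfold pvMidRow
    have e1 : (List.range g.length).filter (fun j => pvP i m (m+1) j && (pvC g (m+1) j == b)) =
        (List.range g.length).filter (fun j => decide (j < i) && (pvC g (m+1) j == b)) := by
      apply pv_pred_ext; intro j hj
      unfold pvP
      exact pv_band_congr _ (by rw [decide_eq_decide]; omega)
    have e2 : (List.range g.length).filter (fun j => pvP i (m+1) (m+1) j && (pvC g (m+1) j == b)) =
        (List.range g.length).filter (fun j => decide (j ≤ i) && (pvC g (m+1) j == b)) := by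
      apply pv_pred_ext; intro j hj
      unfold pvP
      exact pv_band_congr _ (by rw [decide_eq_decide]; omega)
    rw [e1, e2, ← pv_filter_le g.length i (by omega)]
    have hc : (pvC g (m+1) i == b) = true := by rw [pvC_symm, hb]; simp
    rw [hc]
    simp [Int.ofNat_eq_natCast]
  · by_cases hk2 : k = i
    · subst hk2
      rw [if_neg hk1, if_pos rfl]
      unfold pvMidRow
      have e1 : (List.range g.length).filter (fun j => pvP k m k j && (pvC g k j == b)) =
          (List.range g.length).filter (fun j => decide (j < m+1) && (pvC g k j == b)) := by
        apply pv_pred_ext; intro j hj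
        unfold pvP
        exact pv_band_congr _ (by rw [decide_eq_decide]; omega)
      have e2 : (List.range g.length).filter (fun j => pvP k (m+1) k j && (pvC g k j == b)) =
          (List.range g.length).filter (fun j => decide (j ≤ m+1) && (pvC g k j == b)) := by
        apply pv_pred_ext; intro j hj
        unfold pvP
        exact pv_band_congr _ (by rw [decide_eq_decide]; omega)
      rw [e1, e2, ← pv_filter_le g.length (m+1) hm]
      have hc : (pvC g k (m+1) == b) = true := by rw [hb]; simp
      rw [hc]
      simp [Int.ofNat_eq_natCast]
    · rw [if_neg hk1, if_neg hk2]
      unfold pvMidRow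
      refine congrArg (List.map _) (pv_pred_ext _ _ _ ?_); intro j hj
      unfold pvP
      exact pv_band_congr _ (by rw [decide_eq_decide]; omega)

theorem pv_step_untouched (g : List (List Int)) (i m : Nat) (b : Bool) (hi : i ≤ m) (_hm : m + 1 < g.length)
    (hb : pvC g i (m + 1) ≠ b) :
    (List.range g.length).map (pvMidRow g b i m) = (List.range g.length).map (pvMidRow g b i (m+1)) := by
  apply List.map_congr_left
  intro k hk
  simp only [List.mem_range] at hk
  unfold pvMidRow
  refine congrArg (List.map _) (pv_pred_ext _ _ _ ?_); intro j hj
  have hcb : (pvC g i (m+1) == b) = false := by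
    cases hcc : pvC g i (m+1) <;> cases b <;> simp_all
  by_cases hc1 : k = i ∧ j = m + 1
  · obtain ⟨h1, h2⟩ := hc1; subst h1; subst h2
    rw [hcb]
    simp
  · by_cases hc2 : k = m + 1 ∧ j = i
    · obtain ⟨h1, h2⟩ := hc2; subst h1; subst h2
      have hcb' : (pvC g (m+1) j == b) = false := by rw [pvC_symm]; exact hcb
      rw [hcb']
      simp
    · unfold pvP
      exact pv_band_congr _ (by rw [decide_eq_decide]; omega)

theorem pvB_step (g : List (List Int)) (i m : Nat) (hi : i ≤ m) (hm : m + 1 < g.length) :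
    pvInnerBody g i (pvMid g i m) (m + 1) = pvMid g i (m + 1) := by
  unfold pvInnerBody
  by_cases h : (2 ≤ PySem.List.pyGetD (PySem.List.pyGetD g (i : Int) []) ((m+1 : Nat) : Int) 0 ∨
      2 ≤ PySem.List.pyGetD (PySem.List.pyGetD g ((m+1 : Nat) : Int) []) (i : Int) 0)
  · rw [if_pos h]
    have hb : pvC g i (m+1) = true := by
      simp only [pvC, Bool.or_eq_true, decide_eq_true_eq]; exact h
    unfold pvMid
    exact Prod.ext (pv_step_mod g i m true hi hm hb) (pv_step_untouched g i m false hi hm (by simp [hb]))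
  · rw [if_neg h]
    have hb : pvC g i (m+1) = false := by
      simp only [pvC, Bool.or_eq_false_iff, decide_eq_false_iff_not]
      exact ⟨fun hh => h (Or.inl hh), fun hh => h (Or.inr hh)⟩
    unfold pvMid
    exact Prod.ext (pv_step_untouched g i m true hi hm (by simp [hb])) (pv_step_mod g i m false hi hm hb)

theorem pvB_innerFold (g : List (List Int)) (i : Nat) :
    ∀ (cnt m : Nat), i ≤ m → m + cnt < g.length →
      (List.range' (m + 1) cnt).foldl (pvInnerBody g i) (pvMid g i m) = pvMid g i (m + cnt) := by
  intro cnt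
  induction cnt with
  | zero => intro m _ _; simp
  | succ cnt ih =>
    intro m him hm
    rw [List.range'_succ, List.foldl_cons, pvB_step g i m him (by omega)]
    have := ih (m + 1) (by omega) (by omega)
    rw [this]
    congr 1
    omega

theorem pvMid_last (g : List (List Int)) (i : Nat) (_hi : i < g.length) :
    pvMid g i (g.length - 1) = pvState g (i + 1) := by
  unfold pvMid pvState
  refine Prod.ext ?_ ?_ <;>
  · apply List.map_congr_left
    intro k hk
    simp only [List.mem_range] at hk
    unfold pvMidRow pvRow
    refine congrArg (List.map _) (pv_pred_ext _ _ _ ?_); intro j hj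
    unfold pvP
    exact pv_band_congr _ (by rw [decide_eq_decide]; omega)

theorem pvState_zero (g : List (List Int)) :
    ((List.range g.length).map (fun _ => ([] : List Int)), (List.range g.length).map (fun _ => ([] : List Int)))
      = pvState g 0 := by
  unfold pvState
  refine Prod.ext ?_ ?_ <;>
  · apply List.map_congr_left
    intro k hk
    simp [pvRow]

theorem pvB_outerFold (g : List (List Int)) :
    ∀ m, m ≤ g.length →
      (List.range m).foldl (pvOuterBody g)
        ((List.range g.length).map (fun _ => []), (List.range g.length).map (fun _ => []))
      = pvState g m := by
  intro m
  induction m with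
  | zero => intro _; simpa using pvState_zero g
  | succ m ih =>
    intro hm
    rw [List.range_succ, List.foldl_append, ih (by omega), List.foldl_cons, List.foldl_nil]
    show pvOuterBody g (pvState g m) m = pvState g (m + 1)
    unfold pvOuterBody
    rw [pvB_diag g m (by omega)]
    have h1 := pvB_innerFold g m (g.length - (m + 1)) m le_rfl (by omega)
    rw [h1]
    have : m + (g.length - (m + 1)) = g.length - 1 := by omega
    rw [this, pvMid_last g m (by omega)]

theorem pvState_final (g : List (List Int)) :
    pvState g g.length =
      ((List.range g.length).map (fun k => ((List.range g.length).filter (fun j => pvC g k j)).map Int.ofNat),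
       (List.range g.length).map (fun k => ((List.range g.length).filter (fun j => !pvC g k j)).map Int.ofNat)) := by
  unfold pvState
  refine Prod.ext ?_ ?_ <;>
  · apply List.map_congr_left
    intro k hk
    simp only [List.mem_range] at hk
    unfold pvRow
    refine congrArg (List.map _) (pv_pred_ext _ _ _ ?_); intro j hj
    have : decide (k < g.length ∨ j < g.length) = true := by simp; omega
    rw [this]
    cases pvC g k j <;> simp

-- ===== VERDICT (by name: the statement is the Claim_ definition above) =====
theorem make_dict_KNN_spec : Claim_equal_make_dict_KNN := by
  intro knn_graph _ _
  unfold Spec_make_dict_KNN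
  rw [pvA_char, pvB_unfold, pvB_outerFold knn_graph knn_graph.length le_rfl, pvState_final]
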